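-- pv_equiv track=rewrite | github.com/Bruno-rasq/Beecrowd-solutions | beginner/pagina07/2162/2162.py | padraoValePico
-- ===== SOURCE A (Python) =====
-- def padraoValePico(dados, n) -> bool:
--     if n < 2:
--         return False  # Se houver menos de 2 números, não pode haver padrão alternado
--
--     for i in range(1, n):
--         if (dados[i] > dados[i - 1] and (i == n - 1 or dados[i] > dados[i + 1])):  # Pico
--             continue
--         elif (dados[i] < dados[i - 1] and (i == n - 1 or dados[i] < dados[i + 1])):  # Vale
--             continue
--         else:
--             return False  # Quebra o padrão
--
--     return True
-- ===== SOURCE B (Python) =====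
-- def padraoValePico(dados, n) -> bool:
--     if n < 2:
--         return False
--     seq = dados[:n]
--     dirs = [(b > a) - (b < a) for a, b in zip(seq, seq[1:])]
--     return 0 not in dirs and all(x != y for x, y in zip(dirs, dirs[1:]))
-- ===== Notes on version B (the rewrite author's own statement) =====
-- stated objective: alternative
-- what changed: Replaces A's single index loop with per-point lookahead (dados[i+1] and an i==n-1 special case) by a staged pipeline: slice the first n values, materialise the list of step directions sign(b-a), then test membership (no zero step) and a pairwise zip (no repeated direction).
-- outside the precondition, e.g. on padraoValePico([1, 1], 3): A returns False, B returns False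
import Mathlib
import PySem

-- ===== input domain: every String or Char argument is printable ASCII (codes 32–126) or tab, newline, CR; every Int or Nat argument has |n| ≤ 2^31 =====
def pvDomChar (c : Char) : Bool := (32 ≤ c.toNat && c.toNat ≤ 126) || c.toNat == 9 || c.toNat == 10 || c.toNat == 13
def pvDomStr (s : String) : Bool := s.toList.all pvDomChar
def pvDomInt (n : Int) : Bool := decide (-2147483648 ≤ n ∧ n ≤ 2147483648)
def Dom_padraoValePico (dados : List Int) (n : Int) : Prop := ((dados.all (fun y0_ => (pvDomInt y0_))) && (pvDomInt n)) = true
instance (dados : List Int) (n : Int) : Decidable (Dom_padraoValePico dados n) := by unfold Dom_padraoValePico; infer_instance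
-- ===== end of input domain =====

-- B replaces A's index loop with per-point lookahead by a staged pipeline: slice the
-- first n values, build the list of step directions, then test 'no zero step' by
-- membership and 'no repeated direction' by a pairwise zip; same O(n) cost.

-- ===== PORT A =====
-- Loop 'for i in range(1, n)' of A; the Nat fuel (n-1 iterations) only makes the loop
-- total, i is the Python loop variable.  pyGetD … 0 is exact under Pre_ (all read
-- indices are in range there; dados[i+1] is never read by the Python when i = n-1
-- because the 'or' short-circuits, and the 'i == n-1' disjunct decides the Bool there).
def goA (dados : List Int) (n : Int) : Nat → Int → Bool
  | 0, _ => true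
  | fuel+1, i =>
    if i < n then
      if PySem.List.pyGetD dados i 0 > PySem.List.pyGetD dados (i-1) 0 &&
         (i == n-1 || PySem.List.pyGetD dados i 0 > PySem.List.pyGetD dados (i+1) 0) then
        goA dados n fuel (i+1)                                   -- Pico: continue
      else if PySem.List.pyGetD dados i 0 < PySem.List.pyGetD dados (i-1) 0 &&
         (i == n-1 || PySem.List.pyGetD dados i 0 < PySem.List.pyGetD dados (i+1) 0) then
        goA dados n fuel (i+1)                                   -- Vale: continue
      else false                                                 -- Quebra o padrão
    else true

def padraoValePico (dados : List Int) (n : Int) : Bool :=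
  if n < 2 then false else goA dados n (n-1).toNat 1

-- ===== PORT B =====
-- Port of Python's '(b > a) - (b < a)' (bools as ints).
def stepDir (a b : Int) : Int := (if b > a then 1 else 0) - (if b < a then 1 else 0)

def padraoValePico_alt (dados : List Int) (n : Int) : Bool :=
  if n < 2 then false
  else
    let seq := PySem.List.slice dados none (some n)                      -- dados[:n]
    let dirs := (seq.zip seq.tail).map (fun p => stepDir p.1 p.2)        -- zip(seq, seq[1:])
    !(dirs.contains 0) && (dirs.zip dirs.tail).all (fun p => p.1 != p.2)

-- ===== PRECONDITION & SPEC =====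
-- Pre_ excludes n > len(dados), on which the Python A may raise IndexError (depending on
-- the values it may also return False before reaching an out-of-range index).
def Pre_padraoValePico (dados : List Int) (n : Int) : Prop := n ≤ dados.length
instance (dados : List Int) (n : Int) : Decidable (Pre_padraoValePico dados n) := by
  unfold Pre_padraoValePico; infer_instance

def pvWitness_padraoValePico : List Int × Int := ([1, 3, 2, 4], 4)

def Spec_padraoValePico (dados : List Int) (n : Int) (out : Bool) : Prop := out = padraoValePico_alt dados n
instance (dados : List Int) (n : Int) (out : Bool) : Decidable (Spec_padraoValePico dados n out) := by unfold Spec_padraoValePico; infer_instance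

-- ===== CLAIM (what is proved, stated in full; the proofs are below) =====
def Claim_equal_padraoValePico : Prop := ∀ (dados : List Int) (n : Int), Dom_padraoValePico dados n → Pre_padraoValePico dados n → Spec_padraoValePico dados n (padraoValePico dados n)

-- ===== LEMMAS AND PROOFS =====

-- Step-direction list of a sequence (proof-side; B builds the same list via zip+map,
-- see dirsOf_eq).
def dirsOf : List Int → List Int
  | a :: b :: t => stepDir a b :: dirsOf (b :: t)
  | _ => []

-- One-pass characterisation of B's two checks: each direction nonzero and different
-- from the previous one (prev = 0 at the start).
def altOk : Int → List Int → Bool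
  | _, [] => true
  | prev, d :: ds => (d != 0) && (d != prev) && altOk d ds

lemma dirsOf_short (l : List Int) (h : l.length ≤ 1) : dirsOf l = [] := by
  match l, h with
  | [], _ => rfl
  | [a], _ => rfl

lemma dirsOf_eq (l : List Int) :
    dirsOf l = (l.zip l.tail).map (fun p => stepDir p.1 p.2) := by
  induction l with
  | nil => rfl
  | cons a t ih =>
      cases t with
      | nil => rfl
      | cons b t2 => simp only [dirsOf, ih, List.tail_cons, List.zip_cons_cons, List.map_cons]

lemma altOk_char : ∀ (ds : List Int) (prev : Int),
    altOk prev ds = ((ds.all (fun d => d != 0)) &&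
      ((ds.zip ds.tail).all (fun p => p.1 != p.2)) &&
      (match ds with | [] => true | d :: _ => (prev == 0) || (d != prev))) := by
  intro ds
  induction ds with
  | nil => intro prev; rfl
  | cons d ds ih =>
      intro prev
      cases ds with
      | nil =>
          rw [Bool.eq_iff_iff]
          by_cases hq : prev = 0 <;> simp [altOk, hq]
      | cons e t =>
          rw [altOk, ih, Bool.eq_iff_iff]
          simp only [List.all_cons, List.tail_cons, List.zip_cons_cons, Bool.and_eq_true,
            Bool.or_eq_true, bne_iff_ne, beq_iff_eq]
          rw [show (d ≠ e) ↔ (e ≠ d) from ne_comm]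
          by_cases hq : prev = 0
          · subst hq; tauto
          · tauto

-- Invariant carried when A's loop enters index i: prev = 0 at the very start, otherwise
-- prev records the previous direction AND (because A passed its peak/valley test at i-1
-- with i-1 < n-1) the step i-1 → i goes the OPPOSITE way.
def invA (dados : List Int) (i prev : Int) : Prop :=
  (prev = 0 ∧ i = 1)
  ∨ (prev = 1 ∧ PySem.List.pyGetD dados i 0 < PySem.List.pyGetD dados (i-1) 0)
  ∨ (prev = -1 ∧ PySem.List.pyGetD dados i 0 > PySem.List.pyGetD dados (i-1) 0)

lemma goA_stop (dados : List Int) (n : Int) (k : Nat) (i : Int) (h : ¬ i < n) :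
    goA dados n k i = true := by
  cases k <;> simp [goA, h]

-- segment-shape helper: dropping before an in-range index exposes that element
lemma seg_cons (dados : List Int) (n : Int) (j : Nat)
    (hn : n ≤ (dados.length : Int)) (hj : (j : Int) < n) :
    (dados.take n.toNat).drop j = PySem.List.pyGetD dados (j : Int) 0 ::
      (dados.take n.toNat).drop (j+1) := by
  have hjl : j < dados.length := by omega
  have hjt : j < (dados.take n.toNat).length := by
    simp only [List.length_take]
    omega
  rw [List.drop_eq_getElem_cons hjt]
  congr 1
  rw [List.getElem_take]
  rw [PySem.List.pyGetD_natCast]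
  simp [List.getD, hjl]

lemma agree (dados : List Int) : ∀ (k : Nat) (n i prev : Int),
    n ≤ (dados.length : Int) → n - i ≤ (k : Int) → 1 ≤ i → i ≤ n → invA dados i prev →
    goA dados n k i = altOk prev (dirsOf ((dados.take n.toNat).drop (i-1).toNat)) := by
  intro k
  induction k with
  | zero =>
      intro n i prev hlen hk h1 hin _
      have hi : i = n := by omega
      have hlen1 : ((dados.take n.toNat).drop (i-1).toNat).length ≤ 1 := by
        simp only [List.length_drop, List.length_take]
        omega
      rw [dirsOf_short _ hlen1]
      simp [goA, altOk]
  | succ k ih =>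
      intro n i prev hlen hk h1 hin hinv
      by_cases hni : i < n
      · have hit : ((i - 1).toNat : Int) = i - 1 := by omega
        have e1 : (dados.take n.toNat).drop (i-1).toNat =
            PySem.List.pyGetD dados (i-1) 0 :: (dados.take n.toNat).drop ((i-1).toNat + 1) := by
          have := seg_cons dados n (i-1).toNat hlen (by omega)
          rwa [hit] at this
        have hit2 : (i-1).toNat + 1 = i.toNat := by omega
        have e2 : (dados.take n.toNat).drop i.toNat =
            PySem.List.pyGetD dados i 0 :: (dados.take n.toNat).drop (i.toNat + 1) := by
          have := seg_cons dados n i.toNat hlen (by omega)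
          rwa [show ((i.toNat : Nat) : Int) = i by omega] at this
        rw [goA]
        simp only [hni, if_pos]
        rw [e1, hit2, e2]
        simp only [dirsOf]
        by_cases hba : PySem.List.pyGetD dados i 0 > PySem.List.pyGetD dados (i-1) 0
        · -- step up: stepDir = 1; prev ≠ 1 from the invariant
          have hd : stepDir (PySem.List.pyGetD dados (i-1) 0) (PySem.List.pyGetD dados i 0) = 1 := by
            simp only [stepDir]
            split_ifs <;> omega
          have hp1 : prev ≠ 1 := by
            rcases hinv with ⟨h0, _⟩ | ⟨_, hl⟩ | ⟨h0, _⟩ <;> omega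
          have hp1' : ((1 : Int) != prev) = true := by
            simp only [bne_iff_ne]; omega
          by_cases hlast : i = n - 1
          · have hl : (i == n - 1) = true := by simp [hlast]
            have hrest : (dados.take n.toNat).drop (i.toNat + 1) = [] := by
              apply List.eq_nil_of_length_eq_zero
              simp only [List.length_drop, List.length_take]
              omega
            rw [hrest]
            have hA : goA dados n k (i+1) = true := goA_stop dados n k (i+1) (by omega)
            simp [hba, hl, hA, altOk, dirsOf, hd, hp1']
          · have hl : (i == n - 1) = false := by simp; omega
            have e3 : (dados.take n.toNat).drop (i.toNat + 1) =
                PySem.List.pyGetD dados (i+1) 0 :: (dados.take n.toNat).drop ((i.toNat + 1) + 1) := by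
              have := seg_cons dados n (i.toNat + 1) hlen (by omega)
              rwa [show ((i.toNat + 1 : Nat) : Int) = i + 1 by omega] at this
            rw [e3]
            simp only [dirsOf]
            by_cases hbc : PySem.List.pyGetD dados i 0 > PySem.List.pyGetD dados (i+1) 0
            · -- peak: both continue, invariant for prev' = 1 holds
              have hinv' : invA dados (i+1) 1 := by
                right; left
                exact ⟨rfl, by rw [show i + 1 - 1 = i by omega]; omega⟩
              have hrec := ih n (i+1) 1 hlen (by omega) (by omega) (by omega) hinv'
              rw [show (i + 1 - 1).toNat = i.toNat by omega, e2, e3] at hrec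
              simp only [dirsOf] at hrec
              simp [hba, hbc, hd, hp1', altOk, hrec]
            · -- A fails the lookahead; B's direction list repeats (or has 0) next
              have hd2 : stepDir (PySem.List.pyGetD dados i 0) (PySem.List.pyGetD dados (i+1) 0) = 1 ∨
                  stepDir (PySem.List.pyGetD dados i 0) (PySem.List.pyGetD dados (i+1) 0) = 0 := by
                simp only [stepDir]
                split_ifs <;> omega
              rcases hd2 with hd2 | hd2 <;>
                simp [hba, hbc, hl, hd, hd2, hp1', altOk] <;>
                (intros; omega)
        · by_cases hab : PySem.List.pyGetD dados i 0 < PySem.List.pyGetD dados (i-1) 0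
          · -- step down: stepDir = -1; prev ≠ -1 from the invariant
            have hd : stepDir (PySem.List.pyGetD dados (i-1) 0) (PySem.List.pyGetD dados i 0) = -1 := by
              simp only [stepDir]
              split_ifs <;> omega
            have hp1 : prev ≠ -1 := by
              rcases hinv with ⟨h0, _⟩ | ⟨h0, _⟩ | ⟨_, hg⟩ <;> omega
            have hp1' : (((-1) : Int) != prev) = true := by
              simp only [bne_iff_ne]; omega
            by_cases hlast : i = n - 1
            · have hl : (i == n - 1) = true := by simp [hlast]
              have hrest : (dados.take n.toNat).drop (i.toNat + 1) = [] := by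
                apply List.eq_nil_of_length_eq_zero
                simp only [List.length_drop, List.length_take]
                omega
              rw [hrest]
              have hA : goA dados n k (i+1) = true := goA_stop dados n k (i+1) (by omega)
              simp [hba, hab, hl, hA, altOk, dirsOf, hd, hp1']
            · have hl : (i == n - 1) = false := by simp; omega
              have e3 : (dados.take n.toNat).drop (i.toNat + 1) =
                  PySem.List.pyGetD dados (i+1) 0 :: (dados.take n.toNat).drop ((i.toNat + 1) + 1) := by
                have := seg_cons dados n (i.toNat + 1) hlen (by omega)
                rwa [show ((i.toNat + 1 : Nat) : Int) = i + 1 by omega] at this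
              rw [e3]
              simp only [dirsOf]
              by_cases hbc : PySem.List.pyGetD dados i 0 < PySem.List.pyGetD dados (i+1) 0
              · -- valley: both continue, invariant for prev' = -1 holds
                have hinv' : invA dados (i+1) (-1) := by
                  right; right
                  exact ⟨rfl, by rw [show i + 1 - 1 = i by omega]; omega⟩
                have hrec := ih n (i+1) (-1) hlen (by omega) (by omega) (by omega) hinv'
                rw [show (i + 1 - 1).toNat = i.toNat by omega, e2, e3] at hrec
                simp only [dirsOf] at hrec
                simp [hba, hab, hbc, hd, hp1', altOk, hrec]
              · have hd2 : stepDir (PySem.List.pyGetD dados i 0) (PySem.List.pyGetD dados (i+1) 0) = -1 ∨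
                    stepDir (PySem.List.pyGetD dados i 0) (PySem.List.pyGetD dados (i+1) 0) = 0 := by
                  simp only [stepDir]
                  split_ifs <;> omega
                rcases hd2 with hd2 | hd2 <;>
                  simp [hba, hab, hbc, hl, hd, hd2, hp1', altOk]
          · -- equal neighbours: stepDir = 0, both fail immediately
            have heq : PySem.List.pyGetD dados i 0 = PySem.List.pyGetD dados (i-1) 0 := by omega
            have hd : stepDir (PySem.List.pyGetD dados (i-1) 0) (PySem.List.pyGetD dados i 0) = 0 := by
              simp only [stepDir]
              split_ifs <;> omega
            simp [hba, hab, hd, altOk]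
      · have hi : i = n := by omega
        have hlen1 : ((dados.take n.toNat).drop (i-1).toNat).length ≤ 1 := by
          simp only [List.length_drop, List.length_take]
          omega
        rw [dirsOf_short _ hlen1, goA_stop dados n (k+1) i hni]
        rfl

-- ===== VERDICT (by name: the statement is the Claim_ definition above) =====
theorem padraoValePico_spec : Claim_equal_padraoValePico := by
  intro dados n _ hpre
  unfold Spec_padraoValePico padraoValePico padraoValePico_alt
  by_cases h2 : n < 2
  · simp [h2]
  · simp only [h2, if_false]
    have hn0 : n = ((n.toNat : Nat) : Int) := by omega
    have hslice : PySem.List.slice dados none (some n) = dados.take n.toNat := by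
      rw [hn0, PySem.List.slice_to_natCast]
      congr 1
    have hpre' : n ≤ (dados.length : Int) := by
      simpa [Pre_padraoValePico] using hpre
    have hA := agree dados (n-1).toNat n 1 0 hpre' (by omega) le_rfl (by omega)
      (Or.inl ⟨rfl, rfl⟩)
    rw [show ((1:Int) - 1).toNat = 0 by omega, List.drop_zero] at hA
    rw [hA, hslice, altOk_char, dirsOf_eq]
    have hcont : ∀ (l : List Int), (!(l.contains 0)) = l.all (fun d => d != 0) := by
      intro l; induction l with
      | nil => rfl
      | cons x t ih =>
          rw [Bool.eq_iff_iff]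
          simp only [List.contains_cons, Bool.not_or, Bool.and_eq_true,
            List.all_cons, bne_iff_ne, beq_eq_false_iff_ne, ← ih,
            Bool.not_eq_eq_eq_not, Bool.not_true]
          constructor <;> rintro ⟨h1, h2⟩ <;> exact ⟨by omega, by simpa using h2⟩
    rw [← hcont]
    cases hds : ((dados.take n.toNat).zip (dados.take n.toNat).tail).map
        (fun p => stepDir p.1 p.2) <;> simp
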